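-- pv_equiv track=rewrite | github.com/AlexanderSch12/ML_Project | test.py | transform_edge_number
-- ===== SOURCE A (Python) =====
-- def transform_edge_number( rows, cols):
--     result = []
--
--     # Vertical
--     for r in range(rows):
--         for c in range(cols+1):
--             result.append((r*6)+30 + c)
--
--     # Horizontal
--     for r in range(rows+1):
--         for c in range(cols):
--             result.append((r*5) + c)
--
--     result.sort()
--     return result
-- ===== SOURCE B (Python) =====
-- def _edge_runs(rows, cols):
--     # every edge number is part of a contiguous run of consecutive integers:
--     # vertical row r covers [r*6+30, r*6+30+cols], horizontal row r covers [r*5, r*5+cols-1]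
--     runs = []
--     if cols + 1 > 0:
--         for r in range(rows):
--             runs.append((r * 6 + 30, cols + 1))
--     if cols > 0:
--         for r in range(rows + 1):
--             runs.append((r * 5, cols))
--     return runs
--
--
-- def transform_edge_number(rows, cols):
--     runs = _edge_runs(rows, cols)
--     if not runs:
--         return []
--     lo = min(s for s, _ in runs)
--     hi = max(s + l - 1 for s, l in runs)
--     # difference array over the value range, +1 at run start, -1 past run end
--     diff = [0] * (hi - lo + 2)
--     for s, l in runs:
--         diff[s - lo] += 1
--         diff[s - lo + l] -= 1
--     # prefix-sum sweep emits each value with its multiplicity, in order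
--     out = []
--     n = 0
--     for i in range(hi - lo + 1):
--         n += diff[i]
--         if n:
--             out.extend([i + lo] * n)
--     return out
-- ===== Notes on version B (the rewrite author's own statement) =====
-- stated objective: faster
-- what changed: Instead of materialising every edge number and comparison-sorting the list, B records each row as a contiguous run (start, length), builds a +1/-1 difference array over the bounded value range and emits the sorted output in one prefix-sum sweep.
import Mathlib
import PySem

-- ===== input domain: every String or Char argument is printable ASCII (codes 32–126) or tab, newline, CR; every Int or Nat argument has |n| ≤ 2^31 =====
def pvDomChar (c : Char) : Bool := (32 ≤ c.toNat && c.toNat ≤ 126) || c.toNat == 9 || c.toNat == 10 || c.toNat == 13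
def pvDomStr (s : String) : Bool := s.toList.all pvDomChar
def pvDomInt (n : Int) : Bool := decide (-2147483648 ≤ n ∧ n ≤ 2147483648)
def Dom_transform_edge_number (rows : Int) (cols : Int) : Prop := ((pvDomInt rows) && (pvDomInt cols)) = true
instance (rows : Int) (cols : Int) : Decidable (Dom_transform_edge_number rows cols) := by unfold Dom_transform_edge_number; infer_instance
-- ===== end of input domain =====

-- B replaces A's build-every-element-then-comparison-sort by a difference-array counting sweep
-- over the contiguous runs of edge numbers (objective: faster); neither version mutates an argument.

-- ===== PORT A =====
def transform_edge_number (rows : Int) (cols : Int) : List Int :=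
  let result : List Int := []
  let result := (PySem.List.pyRange 0 rows 1).foldl (fun result r =>
    (PySem.List.pyRange 0 (cols + 1) 1).foldl (fun result c =>
      result ++ [r * 6 + 30 + c]) result) result
  let result := (PySem.List.pyRange 0 (rows + 1) 1).foldl (fun result r =>
    (PySem.List.pyRange 0 cols 1).foldl (fun result c =>
      result ++ [r * 5 + c]) result) result
  PySem.List.sorted result (fun x => x) false


-- ===== PORT B =====
-- helper `_edge_runs` of Source B
def pvEdgeRuns (rows : Int) (cols : Int) : List (Int × Int) :=
  let runs : List (Int × Int) := []
  let runs := if cols + 1 > 0 then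
    (PySem.List.pyRange 0 rows 1).foldl (fun runs r => runs ++ [(r * 6 + 30, cols + 1)]) runs
  else runs
  let runs := if cols > 0 then
    (PySem.List.pyRange 0 (rows + 1) 1).foldl (fun runs r => runs ++ [(r * 5, cols)]) runs
  else runs
  runs

def transform_edge_number_alt (rows : Int) (cols : Int) : List Int :=
  let runs := pvEdgeRuns rows cols
  if runs = [] then []
  else
    match PySem.List.min? (runs.map (fun p => p.1)) (fun x => x),
          PySem.List.max? (runs.map (fun p => p.1 + p.2 - 1)) (fun x => x) with
    | some lo, some hi =>
      let diff : List Int := List.replicate (hi - lo + 2).toNat 0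
      let diff := runs.foldl (fun d p =>
        let d := d.set (p.1 - lo).toNat (d.getD (p.1 - lo).toNat 0 + 1)
        d.set (p.1 - lo + p.2).toNat (d.getD (p.1 - lo + p.2).toNat 0 - 1)) diff
      let st := (PySem.List.pyRange 0 (hi - lo + 1) 1).foldl (fun (st : Int × List Int) i =>
        let n := st.1 + diff.getD i.toNat 0
        (n, if n ≠ 0 then st.2 ++ List.replicate n.toNat (lo + i) else st.2)) ((0 : Int), ([] : List Int))
      st.2
    | _, _ => []


-- ===== PRECONDITION & SPEC =====
def Spec_transform_edge_number (rows : Int) (cols : Int) (out : List Int) : Prop := out = transform_edge_number_alt rows cols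
instance (rows : Int) (cols : Int) (out : List Int) : Decidable (Spec_transform_edge_number rows cols out) := by unfold Spec_transform_edge_number; infer_instance

-- ===== CLAIM =====
def Claim_equal_transform_edge_number : Prop := ∀ (rows : Int) (cols : Int), Dom_transform_edge_number rows cols → Spec_transform_edge_number rows cols (transform_edge_number rows cols)

-- ===== LEMMAS AND PROOFS =====

lemma pyRange_map_add (a n : Int) :
    (PySem.List.pyRange 0 n 1).map (fun c => a + c) = PySem.List.pyRange a (a + n) 1 := by
  simp [PySem.List.pyRange_one, List.map_map, Function.comp]

lemma flatMap_singleton_map {α β : Type} (l : List α) (g : α → β) :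
    List.flatMap (fun x => [g x]) l = List.map g l := by
  induction l with
  | nil => rfl
  | cons a t ih => simp [List.flatMap_cons, ih]

lemma pvRuns_eq (rows cols : Int) :
    pvEdgeRuns rows cols =
      (if cols + 1 > 0 then (PySem.List.pyRange 0 rows 1).map (fun r => (r * 6 + 30, cols + 1)) else [])
      ++ (if cols > 0 then (PySem.List.pyRange 0 (rows + 1) 1).map (fun r => (r * 5, cols)) else []) := by
  unfold pvEdgeRuns
  split_ifs <;>
    simp [← List.flatMap_def, flatMap_singleton_map]

def pvVals (runs : List (Int × Int)) : List Int :=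
  runs.flatMap (fun p => PySem.List.pyRange p.1 (p.1 + p.2) 1)

lemma pvA_list_eq (rows cols : Int) :
    ((PySem.List.pyRange 0 (rows + 1) 1).foldl (fun result r =>
      (PySem.List.pyRange 0 cols 1).foldl (fun result c => result ++ [r * 5 + c]) result)
      ((PySem.List.pyRange 0 rows 1).foldl (fun result r =>
        (PySem.List.pyRange 0 (cols + 1) 1).foldl (fun result c => result ++ [r * 6 + 30 + c]) result) []))
    = pvVals (pvEdgeRuns rows cols) := by
  have hv : ∀ (res : List Int) (r : Int),
      (PySem.List.pyRange 0 (cols + 1) 1).foldl (fun result c => result ++ [r * 6 + 30 + c]) res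
      = res ++ PySem.List.pyRange (r * 6 + 30) (r * 6 + 30 + (cols + 1)) 1 := by
    intro res r
    rw [PySem.List.foldl_append_singleton_eq_map, ← pyRange_map_add]
  have hh : ∀ (res : List Int) (r : Int),
      (PySem.List.pyRange 0 cols 1).foldl (fun result c => result ++ [r * 5 + c]) res
      = res ++ PySem.List.pyRange (r * 5) (r * 5 + cols) 1 := by
    intro res r
    rw [PySem.List.foldl_append_singleton_eq_map, ← pyRange_map_add]
  simp only [hv, hh, PySem.List.foldl_append_eq_flatMap, List.nil_append]
  rw [pvRuns_eq]
  unfold pvVals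
  split_ifs with h1 h2
  · simp [List.flatMap_append, List.flatMap_map]
  · -- cols + 1 > 0, cols ≤ 0 : horizontal inner ranges are empty
    have : ∀ r : Int, PySem.List.pyRange (r * 5) (r * 5 + cols) 1 = [] := fun r =>
      PySem.List.pyRange_one_eq_nil (by omega)
    simp [List.flatMap_map, this]
  · -- cols + 1 ≤ 0 : vertical inner empty, cols > 0 impossible since cols ≤ -1
    omega
  · have h1' : ∀ r : Int, PySem.List.pyRange (r * 6 + 30) (r * 6 + 30 + (cols + 1)) 1 = [] :=
      fun r => PySem.List.pyRange_one_eq_nil (by omega)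
    have h2' : ∀ r : Int, PySem.List.pyRange (r * 5) (r * 5 + cols) 1 = [] := fun r =>
      PySem.List.pyRange_one_eq_nil (by omega)
    simp [h1', h2']

-- ===== continuing: counting lemmas =====

lemma pvRuns_pos (rows cols : Int) : ∀ p ∈ pvEdgeRuns rows cols, 0 < p.2 := by
  intro p hp
  rw [pvRuns_eq] at hp
  rcases List.mem_append.mp hp with h | h
  · by_cases hc : cols + 1 > 0
    · rw [if_pos hc] at h; obtain ⟨r, -, rfl⟩ := List.mem_map.mp h; omega
    · rw [if_neg hc] at h; simp at h
  · by_cases hc : cols > 0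
    · rw [if_pos hc] at h; obtain ⟨r, -, rfl⟩ := List.mem_map.mp h; omega
    · rw [if_neg hc] at h; simp at h

def pvN (runs : List (Int × Int)) (lo i : Int) : Int :=
  (runs.map (fun p => if p.1 - lo ≤ i ∧ i < p.1 - lo + p.2 then (1 : Int) else 0)).sum

lemma pvN_nonneg (runs : List (Int × Int)) (lo i : Int) : 0 ≤ pvN runs lo i := by
  unfold pvN
  induction runs with
  | nil => simp
  | cons p t ih => simp only [List.map_cons, List.sum_cons]; split_ifs <;> omega

lemma count_pyRange (a b v : Int) :
    (PySem.List.pyRange a b 1).count v = if a ≤ v ∧ v < b then 1 else 0 := by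
  by_cases h : a ≤ v ∧ v < b
  · rw [if_pos h]
    exact List.count_eq_one_of_mem (PySem.List.nodup_pyRange_one a b)
      (PySem.List.mem_pyRange_one.mpr h)
  · rw [if_neg h]
    exact List.count_eq_zero_of_not_mem (fun hm => h (PySem.List.mem_pyRange_one.mp hm))

lemma pvVals_count (runs : List (Int × Int)) (lo v : Int) :
    ((pvVals runs).count v : Int) = pvN runs lo (v - lo) := by
  induction runs with
  | nil => simp [pvVals, pvN]
  | cons p t ih =>
    have : pvVals (p :: t) = PySem.List.pyRange p.1 (p.1 + p.2) 1 ++ pvVals t := by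
      simp [pvVals]
    rw [this]
    simp only [List.count_append, pvN, List.map_cons, List.sum_cons]
    push_cast
    rw [ih, count_pyRange]
    unfold pvN
    split_ifs <;> push_cast <;> omega

-- ===== difference-array lemmas =====

lemma getD_set (d : List Int) (i j : Nat) (a : Int) :
    (d.set i a).getD j 0 = if i = j ∧ j < d.length then a else d.getD j 0 := by
  simp only [List.getD_eq_getElem?_getD, List.getElem?_set]
  split_ifs with h1 h2 h3 <;> simp_all

def pvDiffStep (lo : Int) (d : List Int) (p : Int × Int) : List Int :=
  let d := d.set (p.1 - lo).toNat (d.getD (p.1 - lo).toNat 0 + 1)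
  d.set (p.1 - lo + p.2).toNat (d.getD (p.1 - lo + p.2).toNat 0 - 1)

lemma length_pvDiffStep (lo : Int) (d : List Int) (p : Int × Int) :
    (pvDiffStep lo d p).length = d.length := by
  simp [pvDiffStep]

lemma getD_set2 (d : List Int) (i1 i2 j : Nat) (a b : Int)
    (h1 : i1 < d.length) (h2 : i2 < d.length) (_hne : i1 ≠ i2) :
    ((d.set i1 a).set i2 b).getD j 0
      = if j = i2 then b else if j = i1 then a else d.getD j 0 := by
  rw [getD_set, getD_set, List.length_set]
  split_ifs <;> omega

lemma pvDiff_getD (lo : Int) (runs : List (Int × Int)) (d : List Int)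
    (hidx : ∀ p ∈ runs, 0 ≤ p.1 - lo ∧ 0 < p.2 ∧ p.1 - lo + p.2 < d.length) (j : Nat) :
    (runs.foldl (pvDiffStep lo) d).getD j 0
      = d.getD j 0 + (runs.map (fun p =>
          (if p.1 - lo = (j : Int) then (1 : Int) else 0)
          + (if p.1 - lo + p.2 = (j : Int) then -1 else 0))).sum := by
  induction runs generalizing d with
  | nil => simp
  | cons p t ih =>
    have hp := hidx p (List.mem_cons_self ..)
    have hlen := length_pvDiffStep lo d p
    have hlt1 : (p.1 - lo).toNat < d.length := by omega
    have hlt2 : (p.1 - lo + p.2).toNat < d.length := by omega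
    have hne : (p.1 - lo).toNat ≠ (p.1 - lo + p.2).toNat := by omega
    have hb : (d.set (p.1 - lo).toNat (d.getD (p.1 - lo).toNat 0 + 1)).getD
        (p.1 - lo + p.2).toNat 0 = d.getD (p.1 - lo + p.2).toNat 0 := by
      rw [getD_set, if_neg (fun hc => hne hc.1)]
    have hstep_eq : pvDiffStep lo d p
        = (d.set (p.1 - lo).toNat (d.getD (p.1 - lo).toNat 0 + 1)).set
            (p.1 - lo + p.2).toNat (d.getD (p.1 - lo + p.2).toNat 0 - 1) := by
      simp only [pvDiffStep, hb]
    rw [List.foldl_cons, ih (pvDiffStep lo d p)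
      (fun q hq => by have := hidx q (List.mem_cons_of_mem _ hq); omega)]
    have hstep : (pvDiffStep lo d p).getD j 0
        = d.getD j 0 + (if p.1 - lo = (j : Int) then (1 : Int) else 0)
          + (if p.1 - lo + p.2 = (j : Int) then -1 else 0) := by
      rw [hstep_eq, getD_set2 d _ _ j _ _ hlt1 hlt2 hne]
      by_cases hj2 : j = (p.1 - lo + p.2).toNat
      · subst hj2; rw [if_pos rfl]; split_ifs <;> omega
      · rw [if_neg hj2]
        by_cases hj1 : j = (p.1 - lo).toNat
        · subst hj1; rw [if_pos rfl]; split_ifs <;> omega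
        · rw [if_neg hj1]; split_ifs <;> omega
    simp only [List.map_cons, List.sum_cons]
    rw [hstep]
    ring

lemma getD_replicate_zero (m j : Nat) : (List.replicate m (0 : Int)).getD j 0 = 0 := by
  simp only [List.getD_eq_getElem?_getD, List.getElem?_replicate]
  split_ifs <;> simp

-- the increment identity: coverage count moves by the difference entries
lemma pvN_succ (runs : List (Int × Int)) (lo i : Int) (hpos : ∀ p ∈ runs, 0 < p.2) :
    pvN runs lo i = pvN runs lo (i - 1)
      + (runs.map (fun p =>
          (if p.1 - lo = i then (1 : Int) else 0)
          + (if p.1 - lo + p.2 = i then -1 else 0))).sum := by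
  induction runs with
  | nil => simp [pvN]
  | cons p t ih =>
    have hp := hpos p (List.mem_cons_self ..)
    have ih' := ih (fun q hq => hpos q (List.mem_cons_of_mem _ hq))
    have key : (if p.1 - lo ≤ i ∧ i < p.1 - lo + p.2 then (1 : Int) else 0)
        = (if p.1 - lo ≤ i - 1 ∧ i - 1 < p.1 - lo + p.2 then (1 : Int) else 0)
          + ((if p.1 - lo = i then (1 : Int) else 0)
             + (if p.1 - lo + p.2 = i then -1 else 0)) := by
      split_ifs <;> omega
    simp only [pvN, List.map_cons, List.sum_cons] at *
    rw [key, ih']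
    ring

-- ===== sweep lemmas =====

def pvSweepStep (lo : Int) (diff : List Int) (st : Int × List Int) (i : Int) : Int × List Int :=
  let n := st.1 + diff.getD i.toNat 0
  (n, if n ≠ 0 then st.2 ++ List.replicate n.toNat (lo + i) else st.2)

lemma pvN_neg (runs : List (Int × Int)) (lo i : Int) (hlo : ∀ p ∈ runs, lo ≤ p.1)
    (hi0 : i < 0) : pvN runs lo i = 0 := by
  unfold pvN
  apply List.sum_eq_zero
  intro x hx
  obtain ⟨p, hp, rfl⟩ := List.mem_map.mp hx
  rw [if_neg]
  intro hc
  have := hlo p hp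
  omega

lemma pvSweep (runs : List (Int × Int)) (lo hi : Int)
    (hruns : ∀ p ∈ runs, lo ≤ p.1 ∧ 0 < p.2 ∧ p.1 + p.2 - 1 ≤ hi) (hlohi : lo ≤ hi) :
    ∀ k : Nat, (k : Int) ≤ hi - lo + 1 →
    (PySem.List.pyRange 0 (k : Int) 1).foldl
        (pvSweepStep lo (runs.foldl (pvDiffStep lo) (List.replicate (hi - lo + 2).toNat 0)))
        ((0 : Int), ([] : List Int))
      = (pvN runs lo ((k : Int) - 1),
         (PySem.List.pyRange 0 (k : Int) 1).flatMap
           (fun i => List.replicate (pvN runs lo i).toNat (lo + i))) := by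
  intro k hk
  induction k with
  | zero =>
    simp only [Nat.cast_zero, PySem.List.pyRange_one_eq_nil le_rfl, List.foldl_nil,
      List.flatMap_nil]
    rw [pvN_neg runs lo _ (fun p hp => (hruns p hp).1) (by omega)]
  | succ m ih =>
    have hm : (m : Int) ≤ hi - lo + 1 := by push_cast at hk ⊢; omega
    have ih' := ih hm
    have hsplit : PySem.List.pyRange 0 ((m : Nat) + 1 : Int) 1
        = PySem.List.pyRange 0 (m : Int) 1 ++ [(m : Int)] :=
      PySem.List.pyRange_one_succ_right (by positivity)
    have hcast : (((m : Nat) + 1 : Nat) : Int) = ((m : Nat) : Int) + 1 := by push_cast; ring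
    rw [hcast, hsplit, List.foldl_append, ih', List.flatMap_append]
    have hgd : (runs.foldl (pvDiffStep lo) (List.replicate (hi - lo + 2).toNat 0)).getD m 0
        = (runs.map (fun p =>
            (if p.1 - lo = (m : Int) then (1 : Int) else 0)
            + (if p.1 - lo + p.2 = (m : Int) then -1 else 0))).sum := by
      rw [pvDiff_getD lo runs _ (fun p hp => by
          have := hruns p hp
          simp only [List.length_replicate]
          omega) m, getD_replicate_zero]
      ring
    have hn : pvN runs lo ((m : Int) - 1)
          + (runs.foldl (pvDiffStep lo) (List.replicate (hi - lo + 2).toNat 0)).getD m 0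
        = pvN runs lo (m : Int) := by
      rw [hgd, pvN_succ runs lo (m : Int) (fun p hp => (hruns p hp).2.1)]
    simp only [List.foldl_cons, List.foldl_nil, pvSweepStep, Int.toNat_natCast]
    rw [hn]
    have h11 : (m : Int) + 1 - 1 = (m : Int) := by ring
    rw [h11]
    by_cases h0 : pvN runs lo (m : Int) = 0
    · rw [if_neg (not_not_intro h0)]
      simp [h0]
    · rw [if_pos h0]
      simp

-- ===== single-point sums and counts =====

lemma sum_map_zero_fun {α : Type} (l : List α) (g : α → Int) (h : ∀ i ∈ l, g i = 0) :
    (l.map g).sum = 0 :=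
  List.sum_eq_zero (fun x hx => by obtain ⟨i, hi, rfl⟩ := List.mem_map.mp hx; exact h i hi)

lemma sum_ite_single (n i0 : Int) (g : Int → Int) (h0 : 0 ≤ i0) (h1 : i0 < n) :
    ((PySem.List.pyRange 0 n 1).map (fun i => if i = i0 then g i else 0)).sum = g i0 := by
  rw [PySem.List.pyRange_one_append 0 i0 n h0 (le_of_lt h1), PySem.List.pyRange_one_cons h1]
  simp only [List.map_append, List.sum_append, List.map_cons, List.sum_cons]
  rw [sum_map_zero_fun _ _ (fun i hi => by
      rw [if_neg]; have := PySem.List.mem_pyRange_one.mp hi; omega)]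
  rw [sum_map_zero_fun _ _ (fun i hi => by
      rw [if_neg]; have := PySem.List.mem_pyRange_one.mp hi; omega)]
  simp

lemma count_flatMap_replicate (l : List Int) (v lo : Int) (g : Int → Int)
    (hg : ∀ i ∈ l, 0 ≤ g i) :
    ((l.flatMap (fun i => List.replicate (g i).toNat (lo + i))).count v : Int)
      = (l.map (fun i => if lo + i = v then g i else 0)).sum := by
  induction l with
  | nil => simp
  | cons a t ih =>
    simp only [List.flatMap_cons, List.count_append, List.map_cons, List.sum_cons]
    push_cast
    rw [ih (fun i hi => hg i (List.mem_cons_of_mem _ hi)), List.count_replicate]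
    have ha := hg a (List.mem_cons_self ..)
    by_cases h : lo + a = v
    · rw [if_pos (by simp [h]), if_pos h]; push_cast; omega
    · rw [if_neg (by simp [h]), if_neg h]; omega

lemma pvN_zero_outside (runs : List (Int × Int)) (lo hi v : Int)
    (hruns : ∀ p ∈ runs, lo ≤ p.1 ∧ 0 < p.2 ∧ p.1 + p.2 - 1 ≤ hi)
    (hv : v < lo ∨ hi < v) : pvN runs lo (v - lo) = 0 := by
  unfold pvN
  apply sum_map_zero_fun
  intro p hp
  rw [if_neg]
  have := hruns p hp
  omega

-- ===== sortedness of the sweep output =====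

lemma pvPairwise_aux (lo : Int) (g : Int → Nat) :
    ∀ (m : Nat) (a : Int),
      ((PySem.List.pyRange a (a + m) 1).flatMap
        (fun i => List.replicate (g i) (lo + i))).Pairwise (· ≤ ·) := by
  intro m
  induction m with
  | zero => intro a; simp [PySem.List.pyRange_one_eq_nil le_rfl]
  | succ m ih =>
    intro a
    have hcons : PySem.List.pyRange a (a + ((m : Nat) + 1 : Int)) 1
        = a :: PySem.List.pyRange (a + 1) (a + ((m : Nat) + 1 : Int)) 1 :=
      PySem.List.pyRange_one_cons (by push_cast; omega)
    have harg : a + ((m : Nat) + 1 : Int) = (a + 1) + (m : Int) := by ring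
    rw [show ((m + 1 : Nat) : Int) = ((m : Nat) + 1 : Int) by push_cast; ring, hcons,
      List.flatMap_cons, List.pairwise_append]
    refine ⟨List.pairwise_replicate.mpr (Or.inr le_rfl), ?_, ?_⟩
    · rw [harg]; exact ih (a + 1)
    · intro x hx y hy
      have hx' : x = lo + a := List.eq_of_mem_replicate hx
      obtain ⟨i, hi, hyr⟩ := List.mem_flatMap.mp hy
      have hy' : y = lo + i := List.eq_of_mem_replicate hyr
      have hia := (PySem.List.mem_pyRange_one.mp hi).1
      omega


lemma pvAlt_eq (rows cols : Int) :
    transform_edge_number_alt rows cols =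
      (if pvEdgeRuns rows cols = [] then []
       else
         match PySem.List.min? ((pvEdgeRuns rows cols).map (fun p => p.1)) (fun x => x),
               PySem.List.max? ((pvEdgeRuns rows cols).map (fun p => p.1 + p.2 - 1)) (fun x => x) with
         | some lo, some hi =>
           ((PySem.List.pyRange 0 (hi - lo + 1) 1).foldl
             (pvSweepStep lo ((pvEdgeRuns rows cols).foldl (pvDiffStep lo)
               (List.replicate (hi - lo + 2).toNat 0))) ((0 : Int), ([] : List Int))).2
         | _, _ => []) := rfl

lemma pvA_eq (rows cols : Int) :
    transform_edge_number rows cols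
      = PySem.List.sorted (pvVals (pvEdgeRuns rows cols)) (fun x => x) false := by
  simp only [transform_edge_number]
  rw [pvA_list_eq]

lemma pvMainEquiv (rows cols : Int) :
    transform_edge_number rows cols = transform_edge_number_alt rows cols := by
  rw [pvA_eq, pvAlt_eq]
  by_cases hruns : pvEdgeRuns rows cols = []
  · rw [if_pos hruns, hruns]
    rfl
  · rw [if_neg hruns]
    set runs := pvEdgeRuns rows cols with hrdef
    have hmap1 : runs.map (fun p => p.1) ≠ [] := by simpa using hruns
    have hmap2 : runs.map (fun p => p.1 + p.2 - 1) ≠ [] := by simpa using hruns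
    obtain ⟨lo, hmin⟩ : ∃ lo, PySem.List.min? (runs.map (fun p => p.1)) (fun x => x) = some lo := by
      cases h : PySem.List.min? (runs.map (fun p => p.1)) (fun x => x) with
      | none => exact absurd (Iff.mp (PySem.List.min?_eq_none_iff _ _) h) hmap1
      | some lo => exact ⟨lo, rfl⟩
    obtain ⟨hi, hmax⟩ : ∃ hi,
        PySem.List.max? (runs.map (fun p => p.1 + p.2 - 1)) (fun x => x) = some hi := by
      cases h : PySem.List.max? (runs.map (fun p => p.1 + p.2 - 1)) (fun x => x) with
      | none => exact absurd (Iff.mp (PySem.List.max?_eq_none_iff _ _) h) hmap2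
      | some hi => exact ⟨hi, rfl⟩
    have hpos := pvRuns_pos rows cols
    have hlo : ∀ p ∈ runs, lo ≤ p.1 := fun p hp =>
      PySem.List.min?_isMin hmin _ (List.mem_map_of_mem hp)
    have hhi : ∀ p ∈ runs, p.1 + p.2 - 1 ≤ hi := fun p hp =>
      PySem.List.max?_isMax hmax _ (List.mem_map_of_mem hp)
    have hall : ∀ p ∈ runs, lo ≤ p.1 ∧ 0 < p.2 ∧ p.1 + p.2 - 1 ≤ hi := by
      intro p hp
      exact ⟨hlo p hp, hpos p (hrdef ▸ hp), hhi p hp⟩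
    have hlohi : lo ≤ hi := by
      obtain ⟨p, hp, hp1⟩ := List.mem_map.mp (PySem.List.min?_mem hmin)
      have := hall p hp
      omega
    simp only [hmin, hmax]
    have hk : (((hi - lo + 1).toNat : Nat) : Int) = hi - lo + 1 := by omega
    have hsweep := pvSweep runs lo hi hall hlohi (hi - lo + 1).toNat (by omega)
    rw [hk] at hsweep
    rw [hsweep]
    dsimp only
    apply PySem.List.sorted_id_eq_of_perm_of_pairwise
    · -- permutation, via counts
      rw [List.perm_iff_count]
      intro v
      have hcnt : (((PySem.List.pyRange 0 (hi - lo + 1) 1).flatMap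
            (fun i => List.replicate (pvN runs lo i).toNat (lo + i))).count v : Int)
          = ((PySem.List.pyRange 0 (hi - lo + 1) 1).map
              (fun i => if lo + i = v then pvN runs lo i else 0)).sum :=
        count_flatMap_replicate _ v lo _ (fun i _ => pvN_nonneg runs lo i)
      by_cases hv : lo ≤ v ∧ v ≤ hi
      · have hcond : ∀ i, (if lo + i = v then pvN runs lo i else 0)
            = (if i = v - lo then pvN runs lo i else 0) := by
          intro i; split_ifs <;> omega
        have : ((PySem.List.pyRange 0 (hi - lo + 1) 1).map
              (fun i => if lo + i = v then pvN runs lo i else 0)).sum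
            = pvN runs lo (v - lo) := by
          simp only [hcond]
          exact sum_ite_single (hi - lo + 1) (v - lo) _ (by omega) (by omega)
        have hvals := pvVals_count runs lo v
        omega
      · have hz : ((PySem.List.pyRange 0 (hi - lo + 1) 1).map
              (fun i => if lo + i = v then pvN runs lo i else 0)).sum = 0 := by
          apply sum_map_zero_fun
          intro i hi'
          have := PySem.List.mem_pyRange_one.mp hi'
          rw [if_neg (by omega)]
        have hvals := pvVals_count runs lo v
        have hnz := pvN_zero_outside runs lo hi v hall (by omega)
        omega
    · -- sortedness
      have hp := pvPairwise_aux lo (fun i => (pvN runs lo i).toNat) (hi - lo + 1).toNat 0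
      rw [show (0 : Int) + (((hi - lo + 1).toNat : Nat) : Int) = hi - lo + 1 by omega] at hp
      exact hp

-- ===== VERDICT =====
theorem transform_edge_number_spec : Claim_equal_transform_edge_number := by
  intro rows cols _
  unfold Spec_transform_edge_number
  exact pvMainEquiv rows cols
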